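-- pv_equiv track=rewrite | github.com/tjm15/tpa-lab | extract_and_synth.py | _tighten_span
-- ===== SOURCE A (Python) =====
-- from typing import List, Dict, Optional, Tuple
--
-- def _is_meaningful_page(txt: str) -> bool:
--     return len((txt or "").strip()) >= 150
--
-- def _tighten_span(pages: List[str], pstart: int, pend: int) -> Tuple[int, int]:
--     pstart = max(1, pstart)
--     pend = min(len(pages), pend)
--     while pstart < pend and not _is_meaningful_page(pages[pstart - 1]):
--         pstart += 1
--     while pend > pstart and not _is_meaningful_page(pages[pend - 1]):
--         pend -= 1
--     return pstart, pend
-- ===== SOURCE B (Python) =====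
-- def _is_meaningful_page(txt: str) -> bool:
--     return len((txt or "").strip()) >= 150
--
-- def _tighten_span(pages, pstart, pend):
--     pstart = max(1, pstart)
--     pend = min(len(pages), pend)
--     if pstart >= pend:
--         return pstart, pend
--     M = [i for i in range(pstart, pend + 1) if _is_meaningful_page(pages[i - 1])]
--     if M:
--         return M[0], M[-1]
--     return pend, pend
-- ===== Notes on version B (the rewrite author's own statement) =====
-- stated objective: alternative
-- what changed: Replaces the two boundary-trim while-loops with a single full scan that collects all meaningful page indices in the clamped window and returns the first and last (or (pend,pend) if none).
import Mathlib
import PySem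

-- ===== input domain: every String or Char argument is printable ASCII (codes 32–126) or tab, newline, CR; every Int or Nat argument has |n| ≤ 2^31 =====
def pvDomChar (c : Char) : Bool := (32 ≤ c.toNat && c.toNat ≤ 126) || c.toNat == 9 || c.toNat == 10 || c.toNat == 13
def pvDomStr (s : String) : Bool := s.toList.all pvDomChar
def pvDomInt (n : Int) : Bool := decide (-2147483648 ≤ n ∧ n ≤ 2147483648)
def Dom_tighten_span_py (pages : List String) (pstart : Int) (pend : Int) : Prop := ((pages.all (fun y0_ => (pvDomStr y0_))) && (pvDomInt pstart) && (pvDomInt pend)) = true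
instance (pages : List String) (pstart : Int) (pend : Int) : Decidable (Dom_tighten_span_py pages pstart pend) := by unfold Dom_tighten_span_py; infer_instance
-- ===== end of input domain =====

-- B replaces A's two boundary-trim while-loops by one full scan that collects the
-- meaningful page indices of the clamped window and picks its first and last (objective: alternative).

-- ===== PORT A =====
-- _is_meaningful_page: len((txt or "").strip()) >= 150
def pvMeaningful (txt : String) : Bool :=
  150 ≤ PySem.Str.len (PySem.Str.strip (if txt = "" then "" else txt))

-- pages[i-1]; both programs only index with 1 ≤ i ≤ len(pages), so the index is always in
-- range and the `.getD ""` default is never used.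
def pvPageAt (pages : List String) (i : Int) : String :=
  (PySem.List.pyGet? pages (i - 1)).getD ""

-- first while loop `while pstart < pend and not meaningful: pstart += 1`;
-- the fuel is the window gap (pend - pstart).toNat, so fuel > 0 ⇔ pstart < pend.
def pvTrimStartGo (pages : List String) (pstart : Int) : Nat → Int
  | 0 => pstart
  | n + 1 =>
    if ¬ pvMeaningful (pvPageAt pages pstart) then pvTrimStartGo pages (pstart + 1) n
    else pstart

def pvTrimStart (pages : List String) (pend pstart : Int) : Int :=
  pvTrimStartGo pages pstart (pend - pstart).toNat

-- second while loop `while pend > pstart and not meaningful: pend -= 1`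
def pvTrimEndGo (pages : List String) (pend : Int) : Nat → Int
  | 0 => pend
  | n + 1 =>
    if ¬ pvMeaningful (pvPageAt pages pend) then pvTrimEndGo pages (pend - 1) n
    else pend

def pvTrimEnd (pages : List String) (pstart pend : Int) : Int :=
  pvTrimEndGo pages pend (pend - pstart).toNat

def tighten_span_py (pages : List String) (pstart : Int) (pend : Int) : Int × Int :=
  let ps := max 1 pstart
  let pe := min (pages.length : Int) pend
  let ps' := pvTrimStart pages pe ps
  let pe' := pvTrimEnd pages ps' pe
  (ps', pe')

-- ===== PORT B =====
def tighten_span_py_alt (pages : List String) (pstart : Int) (pend : Int) : Int × Int :=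
  let ps := max 1 pstart
  let pe := min (pages.length : Int) pend
  if ps ≥ pe then (ps, pe)
  else
    let M := (PySem.List.pyRange ps (pe + 1) 1).filter
      (fun i => pvMeaningful ((PySem.List.pyGet? pages (i - 1)).getD ""))
    match M with
    | [] => (pe, pe)
    | m :: rest => (m, (m :: rest).getLast (List.cons_ne_nil m rest))

-- ===== PRECONDITION & SPEC =====
def Spec_tighten_span_py (pages : List String) (pstart : Int) (pend : Int) (out : Int × Int) : Prop := out = tighten_span_py_alt pages pstart pend
instance (pages : List String) (pstart : Int) (pend : Int) (out : Int × Int) : Decidable (Spec_tighten_span_py pages pstart pend out) := by unfold Spec_tighten_span_py; infer_instance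

-- ===== CLAIM (what is proved, stated in full; the proofs are below) =====
def Claim_equal_tighten_span_py : Prop := ∀ (pages : List String) (pstart : Int) (pend : Int), Dom_tighten_span_py pages pstart pend → Spec_tighten_span_py pages pstart pend (tighten_span_py pages pstart pend)

-- ===== LEMMAS AND PROOFS =====

-- the end-trim loop started at pend = ps + n with lower bound ps returns the last
-- meaningful index in (ps, pend], else ps
theorem pvTrimEndGo_getLast (pages : List String) (ps : Int) (n : Nat) (pe : Int)
    (hn : pe = ps + n) :
    pvTrimEndGo pages pe n =
      (ps :: (PySem.List.pyRange (ps + 1) (pe + 1) 1).filter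
        (fun i => pvMeaningful (pvPageAt pages i))).getLast (List.cons_ne_nil _ _) := by
  induction n generalizing pe with
  | zero =>
    have hpe : pe = ps := by omega
    subst hpe
    simp [pvTrimEndGo, PySem.List.pyRange_one_eq_nil (le_refl (pe + 1))]
  | succ n ih =>
    have h1 : ps + 1 ≤ pe := by omega
    simp only [pvTrimEndGo]
    by_cases hp : pvMeaningful (pvPageAt pages pe)
    · rw [if_neg (by simp [hp])]
      rw [← Option.some_inj, ← List.getLast?_eq_some_getLast]
      rw [PySem.List.pyRange_one_succ_right h1, List.filter_append]
      simp only [List.filter_cons, List.filter_nil, hp, if_true]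
      rw [← List.cons_append]
      exact List.getLast?_concat.symm
    · rw [if_pos (by simp [hp])]
      have h2 := ih (pe - 1) (by omega)
      simp only [show pe - 1 + 1 = pe from by omega] at h2
      rw [h2]
      have h3 : (PySem.List.pyRange (ps + 1) (pe + 1) 1).filter
            (fun i => pvMeaningful (pvPageAt pages i)) =
          (PySem.List.pyRange (ps + 1) pe 1).filter
            (fun i => pvMeaningful (pvPageAt pages i)) := by
        rw [PySem.List.pyRange_one_succ_right h1, List.filter_append]
        simp [hp]
      simp only [h3]

-- main loop lemma: over the window [ps, pe] the two trimmed endpoints are the first and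
-- last meaningful index of the window (or its collapsed top if there are none)
theorem pvMain (pages : List String) (ps : Int) (n : Nat) (pe : Int) (hn : pe = ps + n) :
    (pvTrimStartGo pages ps n,
      pvTrimEnd pages (pvTrimStartGo pages ps n) pe) =
      (match (PySem.List.pyRange ps (pe + 1) 1).filter
          (fun i => pvMeaningful (pvPageAt pages i)) with
       | [] => (pe, pe)
       | m :: rest => (m, (m :: rest).getLast (List.cons_ne_nil m rest))) := by
  induction n generalizing ps with
  | zero =>
    have hpe : ps = pe := by omega
    subst hpe
    simp only [pvTrimStartGo, pvTrimEnd]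
    rw [show (ps - ps).toNat = 0 from by omega]
    simp only [pvTrimEndGo, PySem.List.pyRange_one_singleton, List.filter_cons, List.filter_nil]
    by_cases hp : pvMeaningful (pvPageAt pages ps)
    · simp [hp]
    · simp [hp]
  | succ n ih =>
    rw [PySem.List.pyRange_one_cons (by omega : ps < pe + 1)]
    simp only [pvTrimStartGo, List.filter_cons]
    by_cases hp : pvMeaningful (pvPageAt pages ps)
    · rw [if_neg (by simp [hp])]
      simp only [hp, if_true]
      unfold pvTrimEnd
      rw [show (pe - ps).toNat = n + 1 from by omega]
      rw [pvTrimEndGo_getLast pages ps (n + 1) pe (by omega)]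
    · rw [if_pos (by simp [hp])]
      simp only [hp, Bool.false_eq_true, if_false]
      exact ih (ps + 1) (by omega)

-- ===== VERDICT (by name: the statement is the Claim_ definition above) =====
theorem tighten_span_py_spec : Claim_equal_tighten_span_py := by
  intro pages pstart pend _
  unfold Spec_tighten_span_py tighten_span_py tighten_span_py_alt
  dsimp only
  by_cases hge : max 1 pstart ≥ min (pages.length : Int) pend
  · rw [if_pos hge]
    simp only [pvTrimStart, pvTrimEnd,
      show (min (pages.length : Int) pend - max 1 pstart).toNat = 0 from by omega,
      pvTrimStartGo, pvTrimEndGo]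
  · rw [if_neg hge]
    have h := pvMain pages (max 1 pstart)
      ((min (pages.length : Int) pend - max 1 pstart).toNat)
      (min (pages.length : Int) pend) (by omega)
    simp only [pvPageAt] at h
    unfold pvTrimStart
    exact h
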